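-- pv_equiv track=rewrite | github.com/minus9d/programming_contest_archive | arc/071/d/d.py | len_sum
-- ===== SOURCE A (Python) =====
-- MOD = 1000000007
--
-- def len_sum(Xs):
--     size = len(Xs)
--     ret = 0
--     n = len(Xs) - 1
--     # 負の値にMODをとることを防ぐため、座標の大きい点から計算する
--     for x in reversed(Xs):
--         ret += n * x
--         ret %= MOD
--         n -= 2
--     return ret
-- ===== SOURCE B (Python) =====
-- MOD = 1000000007
--
-- def len_sum(Xs):
--     total = 0
--     prefix = 0
--     for j, x in enumerate(Xs):
--         total += j * x - prefix
--         prefix += x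
--     return total % MOD
-- ===== Notes on version B (the rewrite author's own statement) =====
-- stated objective: alternative
-- what changed: Replaces the backward pass with a decrementing coefficient and per-step modding by a forward pass that maintains a running prefix sum, adding j*x - prefix at each index and taking the modulus once at the end.
import Mathlib
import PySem

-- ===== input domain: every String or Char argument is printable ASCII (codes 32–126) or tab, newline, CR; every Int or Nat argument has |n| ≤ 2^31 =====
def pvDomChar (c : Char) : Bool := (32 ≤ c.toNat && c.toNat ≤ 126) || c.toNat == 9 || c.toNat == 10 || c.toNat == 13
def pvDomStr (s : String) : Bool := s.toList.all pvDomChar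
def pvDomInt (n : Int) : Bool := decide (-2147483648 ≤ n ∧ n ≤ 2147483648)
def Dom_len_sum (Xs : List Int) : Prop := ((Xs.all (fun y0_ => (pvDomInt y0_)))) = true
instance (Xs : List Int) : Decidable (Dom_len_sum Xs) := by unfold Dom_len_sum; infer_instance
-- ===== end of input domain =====

-- B: forward pass with a running prefix sum (adds j*x - prefix per index, one final mod)
-- instead of A's backward pass with a decrementing coefficient and per-step mod; alternative
-- decomposition, same cost. Return values only; neither program mutates its argument.

-- ===== PORT A =====
def lenSumLoopA : List Int → Int → Int → Int
  | [], ret, _ => ret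
  | x :: t, ret, n => lenSumLoopA t (PySem.Int.mod (ret + n * x) 1000000007) (n - 2)

def len_sum (Xs : List Int) : Int :=
  lenSumLoopA Xs.reverse 0 ((Xs.length : Int) - 1)

-- ===== PORT B =====
def lenSumLoopB : List (Int × Int) → Int → Int → Int
  | [], total, _ => total
  | (j, x) :: t, total, pfx => lenSumLoopB t (total + j * x - pfx) (pfx + x)

def len_sum_alt (Xs : List Int) : Int :=
  PySem.Int.mod (lenSumLoopB (PySem.List.enumerate Xs) 0 0) 1000000007

-- ===== PRECONDITION & SPEC =====
def Spec_len_sum (Xs : List Int) (out : Int) : Prop := out = len_sum_alt Xs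
instance (Xs : List Int) (out : Int) : Decidable (Spec_len_sum Xs out) := by unfold Spec_len_sum; infer_instance

-- ===== CLAIM (what is proved, stated in full; the proofs are below) =====
def Claim_equal_len_sum : Prop := ∀ (Xs : List Int), Dom_len_sum Xs → Spec_len_sum Xs (len_sum Xs)

-- ===== LEMMAS AND PROOFS =====

-- ===== VERDICT (by name: the statement is the Claim_ definition above) =====
-- S xs c = c*x0 + (c+2)*x1 + …, the common weighted sum
def wsum : List Int → Int → Int
  | [], _ => 0
  | x :: t, c => c * x + wsum t (c + 2)

theorem wsum_congr (xs : List Int) {c c' : Int} (h : c = c') : wsum xs c = wsum xs c' := by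
  rw [h]

theorem wsum_append (a b : List Int) (c : Int) :
    wsum (a ++ b) c = wsum a c + wsum b (c + 2 * a.length) := by
  induction a generalizing c with
  | nil => simp [wsum]
  | cons x t ih =>
      simp only [List.cons_append, wsum, List.length_cons, ih]
      rw [wsum_congr b (show (c + 2) + 2 * (t.length : Int)
            = c + 2 * ((t.length : Nat) + 1 : Nat) from by push_cast; ring)]
      ring

theorem mod_mod_add (r y : Int) :
    PySem.Int.mod (PySem.Int.mod r 1000000007 + y) 1000000007
      = PySem.Int.mod (r + y) 1000000007 := by
  have hm : (0 : Int) < 1000000007 := by norm_num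
  simp only [PySem.Int.mod_eq_emod_of_pos hm]
  exact Int.emod_add_emod r 1000000007 y

theorem loopA_eq (xs : List Int) (r n : Int) :
    lenSumLoopA xs (PySem.Int.mod r 1000000007) n
      = PySem.Int.mod (r + wsum xs.reverse (n - 2 * ((xs.length : Int) - 1))) 1000000007 := by
  induction xs generalizing r n with
  | nil => simp [lenSumLoopA, wsum]
  | cons x t ih =>
      simp only [lenSumLoopA, mod_mod_add, ih (r + n * x) (n - 2),
        List.reverse_cons, wsum_append, wsum, List.length_reverse, List.length_cons]
      rw [wsum_congr t.reverse (show (n - 2) - 2 * ((t.length : Int) - 1)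
            = n - 2 * (((t.length : Nat) + 1 : Nat) - 1) from by push_cast; ring)]
      congr 1
      push_cast
      ring

theorem loopB_eq (ps : List (Int × Int)) (a p j : Int)
    (hj : (PySem.List.enumerate (ps.map (·.2)) j) = ps) :
    lenSumLoopB ps a p
      = a - (ps.length : Int) * p + wsum (ps.map (·.2)) (j - (ps.length : Int) + 1) := by
  induction ps generalizing a p j with
  | nil => simp [lenSumLoopB, wsum]
  | cons q t ih =>
      obtain ⟨i, x⟩ := q
      simp only [List.map_cons, PySem.List.enumerate_cons, List.cons.injEq, Prod.mk.injEq] at hj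
      obtain ⟨⟨hi, -⟩, ht⟩ := hj
      subst hi
      simp only [lenSumLoopB, List.map_cons, wsum, List.length_cons]
      rw [ih (a + j * x - p) (p + x) (j + 1) ht]
      rw [wsum_congr (t.map (·.2)) (show (j + 1) - (t.length : Int) + 1
            = j - (((t.length : Nat) + 1 : Nat) : Int) + 1 + 2 from by push_cast; ring)]
      push_cast
      ring

theorem lenSumLoopB_closed (xs : List Int) :
    lenSumLoopB (PySem.List.enumerate xs) 0 0 = wsum xs (1 - (xs.length : Int)) := by
  have h := loopB_eq (PySem.List.enumerate xs) 0 0 0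
    (by rw [PySem.List.map_snd_enumerate])
  rw [PySem.List.map_snd_enumerate, PySem.List.length_enumerate] at h
  rw [h]
  rw [wsum_congr xs (show (0 : Int) - (xs.length : Int) + 1 = 1 - (xs.length : Int) from by ring)]
  ring

theorem len_sum_spec : Claim_equal_len_sum := by
  intro Xs _
  unfold Spec_len_sum len_sum len_sum_alt
  rw [lenSumLoopB_closed]
  have h := loopA_eq Xs.reverse 0 ((Xs.length : Int) - 1)
  rw [show PySem.Int.mod 0 1000000007 = (0 : Int) from by decide] at h
  rw [h, List.reverse_reverse, List.length_reverse, zero_add]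
  rw [wsum_congr Xs (show ((Xs.length : Int) - 1) - 2 * ((Xs.length : Int) - 1)
        = 1 - (Xs.length : Int) from by ring)]
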